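-- pv_equiv track=rewrite | github.com/wesleywh/GameDevRepo | documentation_builder.py | extract_file_description
-- ===== SOURCE A (Python) =====
-- def extract_file_description(contents):
--     inDescription=False
--     retVal=""
--     description=[]
--     for line in contents:
--         if inDescription == True:
--             if "</summary>" in line:
--                 break
--             description.append(line.replace("///","",1).strip())
--         elif "using" in line and inDescription==False:
--             retVal="File has no description."
--             break
--         elif "summary" in line:
--             inDescription=True
--     if len(description) > 0:
--         content=""
--         for line in description:
--             if line == "":
--                 content+="\n\n"
--             else:
--                 content+=" "+line
--         retVal=content
--     return retVal
-- ===== SOURCE B (Python) =====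
-- def extract_file_description(contents):
--     hits = [(i, line) for i, line in enumerate(contents)
--             if "using" in line or "summary" in line]
--     if not hits:
--         return ""
--     i, line = hits[0]
--     if "using" in line:
--         return "File has no description."
--     body = contents[i + 1:]
--     ends = [j for j, line in enumerate(body) if "</summary>" in line]
--     if ends:
--         body = body[:ends[0]]
--     desc = [line.replace("///", "", 1).strip() for line in body]
--     if not desc:
--         return ""
--     return "".join("\n\n" if l == "" else " " + l for l in desc)
-- ===== Notes on version B (the rewrite author's own statement) =====
-- stated objective: alternative
-- what changed: Replaces A's stateful single scan (inDescription flag, break, string accumulator) by an index-based formulation: filter enumerate(contents) for the first marker line, slice contents[i+1:], cut the slice at the first '</summary>' index, then map/strip and join; no flag and no accumulator loop.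
import Mathlib
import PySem

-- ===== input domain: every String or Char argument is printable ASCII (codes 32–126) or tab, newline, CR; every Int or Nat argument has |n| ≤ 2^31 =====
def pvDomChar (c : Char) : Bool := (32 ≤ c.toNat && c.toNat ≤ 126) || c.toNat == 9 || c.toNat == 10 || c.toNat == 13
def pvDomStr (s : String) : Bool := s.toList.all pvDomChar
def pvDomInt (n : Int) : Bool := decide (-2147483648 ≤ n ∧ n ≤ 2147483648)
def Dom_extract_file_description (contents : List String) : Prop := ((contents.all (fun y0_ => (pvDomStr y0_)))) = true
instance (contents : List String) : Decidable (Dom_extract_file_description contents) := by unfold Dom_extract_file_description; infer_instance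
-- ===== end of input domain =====

-- B replaces A's stateful scan by an index-based formulation (filter enumerate, slice, cut, map, join); same cost.

-- shared helper: line.replace("///","",1).strip() — replace with count 1 ported by hand
-- via the FIRST occurrence (PySem.Chars.find), exact for new-string "".
def pvStripRep (line : String) : List Char :=
  let s := line.toList
  let i := PySem.Chars.find s ['/', '/', '/']
  PySem.Chars.strip (if i = -1 then s else s.take i.toNat ++ s.drop (i.toNat + 3))

-- ===== PORT A =====
-- A's single loop: state (inDescription, retVal, description), break = return the pair.
def pvLoopA : List String → Bool → String → List (List Char) → String × List (List Char)
  | [], _, retVal, descr => (retVal, descr)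
  | line :: rest, inD, retVal, descr =>
    if inD then
      if PySem.Chars.isIn "</summary>".toList line.toList then (retVal, descr)
      else pvLoopA rest inD retVal (descr ++ [pvStripRep line])
    else if PySem.Chars.isIn "using".toList line.toList then ("File has no description.", descr)
    else if PySem.Chars.isIn "summary".toList line.toList then pvLoopA rest true retVal descr
    else pvLoopA rest false retVal descr

-- A's formatting loop: content += "\n\n" or " "+line
def pvFmtA : List (List Char) → List Char → List Char
  | [], content => content
  | l :: rest, content =>
      pvFmtA rest (content ++ (if l = [] then ['\n', '\n'] else ' ' :: l))

def extract_file_description (contents : List String) : String :=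
  let (retVal, description) := pvLoopA contents false "" []
  if description.length > 0 then String.ofList (pvFmtA description []) else retVal

-- ===== PORT B =====
-- hits = [(i, line) for i, line in enumerate(contents) if "using" in line or "summary" in line]
def pvIsStart (line : String) : Bool :=
  PySem.Chars.isIn "using".toList line.toList || PySem.Chars.isIn "summary".toList line.toList

def pvIsEnd (line : String) : Bool := PySem.Chars.isIn "</summary>".toList line.toList

def pvPiece (l : List Char) : List Char := if l = [] then ['\n', '\n'] else ' ' :: l

def extract_file_description_alt (contents : List String) : String :=
  let hits := (PySem.List.enumerate contents 0).filter (fun p => pvIsStart p.2)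
  match hits with
  | [] => ""
  | (i, line) :: _ =>
    if PySem.Chars.isIn "using".toList line.toList then "File has no description."
    else
      let body0 := PySem.List.slice contents (some (i + 1)) none
      let ends := (PySem.List.enumerate body0 0).filter (fun p => pvIsEnd p.2)
      let body : List String := match ends with
        | [] => body0
        | (j, _) :: _ => PySem.List.slice body0 none (some j)
      let desc := body.map pvStripRep
      if desc = [] then "" else String.ofList ((desc.map pvPiece).flatten)

-- ===== PRECONDITION & SPEC =====
def Spec_extract_file_description (contents : List String) (out : String) : Prop := out = extract_file_description_alt contents
instance (contents : List String) (out : String) : Decidable (Spec_extract_file_description contents out) := by unfold Spec_extract_file_description; infer_instance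

-- ===== CLAIM =====
def Claim_equal_extract_file_description : Prop := ∀ (contents : List String), Dom_extract_file_description contents → Spec_extract_file_description contents (extract_file_description contents)

-- ===== LEMMAS AND PROOFS =====

-- proof-side first-match helper: first index+element satisfying p
def pvFirstP (p : String → Bool) : List String → Option (Nat × String)
  | [] => none
  | x :: t => if p x then some (0, x) else (pvFirstP p t).map (fun q => (q.1 + 1, q.2))

theorem head_filter_enum (p : String → Bool) :
    ∀ (l : List String) (s : Int),
      ((PySem.List.enumerate l s).filter (fun q => p q.2)).head? =
        (pvFirstP p l).map (fun q => ((s + q.1 : Int), q.2)) := by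
  intro l
  induction l with
  | nil => intro s; simp [PySem.List.enumerate_nil, pvFirstP]
  | cons x t ih =>
    intro s
    rw [PySem.List.enumerate_cons]
    by_cases h : p x = true
    · simp [pvFirstP, h]
    · simp only [List.filter_cons, h, pvFirstP, Bool.false_eq_true, if_false, ih]
      cases pvFirstP p t with
      | none => simp
      | some q => simp; ring

-- the same characterisation phrased through proof-side structural scans matching A's behaviour
def pvFindBody : List String → Option (List String)
  | [] => some []
  | line :: rest =>
    if PySem.Chars.isIn "using".toList line.toList then none
    else if PySem.Chars.isIn "summary".toList line.toList then some rest
    else pvFindBody rest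

def pvCollect : List String → List (List Char)
  | [] => []
  | line :: rest =>
    if PySem.Chars.isIn "</summary>".toList line.toList then []
    else pvStripRep line :: pvCollect rest

-- once inDescription, A's loop just appends pvCollect of the rest
theorem pvLoopA_true (rest : List String) (retVal : String) (descr : List (List Char)) :
    pvLoopA rest true retVal descr = (retVal, descr ++ pvCollect rest) := by
  induction rest generalizing descr with
  | nil => simp [pvLoopA, pvCollect]
  | cons line t ih =>
    simp only [pvLoopA, pvCollect]
    rw [if_pos trivial]
    by_cases h : PySem.Chars.isIn "</summary>".toList line.toList = true
    · rw [if_pos h, if_pos h]; simp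
    · rw [if_neg h, if_neg h, ih]; simp

-- A's loop from the initial state, phrased through the header scan
theorem pvLoopA_false (contents : List String) (retVal : String) :
    pvLoopA contents false retVal [] =
      match pvFindBody contents with
      | none => ("File has no description.", [])
      | some rest => (retVal, pvCollect rest) := by
  induction contents with
  | nil => simp [pvLoopA, pvFindBody, pvCollect]
  | cons line t ih =>
    simp only [pvLoopA, pvFindBody]
    rw [if_neg Bool.false_ne_true]
    by_cases h1 : PySem.Chars.isIn "using".toList line.toList = true
    · rw [if_pos h1, if_pos h1]
    · rw [if_neg h1, if_neg h1]
      by_cases h2 : PySem.Chars.isIn "summary".toList line.toList = true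
      · rw [if_pos h2, if_pos h2, pvLoopA_true]; simp
      · rw [if_neg h2, if_neg h2]; exact ih

-- bridge: first start-marker vs pvFindBody
theorem firstP_findBody (l : List String) :
    (pvFirstP pvIsStart l = none → pvFindBody l = some []) ∧
    (∀ k line, pvFirstP pvIsStart l = some (k, line) →
      (PySem.Chars.isIn "using".toList line.toList = true → pvFindBody l = none) ∧
      (PySem.Chars.isIn "using".toList line.toList = false → pvFindBody l = some (l.drop (k + 1)))) := by
  induction l with
  | nil => exact ⟨fun _ => rfl, fun k line h => by simp [pvFirstP] at h⟩
  | cons x t ih =>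
    by_cases hx : pvIsStart x = true
    · refine ⟨fun h => by simp only [pvFirstP, hx, if_true] at h; exact absurd h (by simp),
        fun k line h => ?_⟩
      simp only [pvFirstP, hx, if_true, Option.some.injEq, Prod.mk.injEq] at h
      obtain ⟨hk, hl⟩ := h
      subst hk; subst hl
      constructor
      · intro hu
        simp only [pvFindBody]
        rw [if_pos (by simpa using hu)]
      · intro hu
        have hs : PySem.Chars.isIn "summary".toList x.toList = true := by
          unfold pvIsStart at hx
          rcases Bool.or_eq_true_iff.mp hx with h | h
          · rw [hu] at h; exact absurd h Bool.false_ne_true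
          · exact h
        simp only [pvFindBody]
        rw [if_neg (by simpa using hu), if_pos (by simpa using hs)]
        simp
    · have hx' : pvIsStart x = false := by simpa using hx
      have hxu : PySem.Chars.isIn "using".toList x.toList = false :=
        (Bool.or_eq_false_iff.mp (pvIsStart.eq_def x ▸ hx')).1
      have hxs : PySem.Chars.isIn "summary".toList x.toList = false :=
        (Bool.or_eq_false_iff.mp (pvIsStart.eq_def x ▸ hx')).2
      have hstep : pvFindBody (x :: t) = pvFindBody t := by
        simp only [pvFindBody]
        rw [if_neg (by simpa using hxu), if_neg (by simpa using hxs)]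
      refine ⟨fun h => ?_, fun k line h => ?_⟩
      · simp only [pvFirstP, hx', Bool.false_eq_true, if_false, Option.map_eq_none_iff] at h
        rw [hstep]; exact ih.1 h
      · simp only [pvFirstP, hx', Bool.false_eq_true, if_false] at h
        cases hfp : pvFirstP pvIsStart t with
        | none => rw [hfp] at h; exact absurd h (by simp)
        | some q =>
          obtain ⟨k', line'⟩ := q
          rw [hfp] at h
          simp only [Option.map_some, Option.some.injEq, Prod.mk.injEq] at h
          obtain ⟨hk, hl⟩ := h
          subst hk; subst hl
          have := ih.2 k' line' hfp
          exact ⟨fun hu => by rw [hstep]; exact this.1 hu,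
                 fun hu => by rw [hstep]; simpa using this.2 hu⟩

-- bridge: first end-marker vs pvCollect
theorem firstP_collect (l : List String) :
    (pvFirstP pvIsEnd l = none → pvCollect l = l.map pvStripRep) ∧
    (∀ k line, pvFirstP pvIsEnd l = some (k, line) → pvCollect l = (l.take k).map pvStripRep) := by
  induction l with
  | nil => exact ⟨fun _ => rfl, fun k line h => by simp [pvFirstP] at h⟩
  | cons x t ih =>
    by_cases hx : pvIsEnd x = true
    · refine ⟨fun h => by simp only [pvFirstP, hx, if_true] at h; exact absurd h (by simp),
        fun k line h => ?_⟩
      simp only [pvFirstP, hx, if_true, Option.some.injEq, Prod.mk.injEq] at h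
      obtain ⟨hk, _⟩ := h
      subst hk
      have hxe : PySem.Chars.isIn "</summary>".toList x.toList = true := pvIsEnd.eq_def x ▸ hx
      simp only [pvCollect]
      rw [if_pos (by simpa using hxe)]
      simp
    · have hx' : pvIsEnd x = false := by simpa using hx
      have hxe : PySem.Chars.isIn "</summary>".toList x.toList = false := pvIsEnd.eq_def x ▸ hx'
      have hstep : pvCollect (x :: t) = pvStripRep x :: pvCollect t := by
        simp only [pvCollect]
        rw [if_neg (by simpa using hxe)]
      refine ⟨fun h => ?_, fun k line h => ?_⟩
      · simp only [pvFirstP, hx', Bool.false_eq_true, if_false, Option.map_eq_none_iff] at h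
        rw [hstep, ih.1 h]; simp
      · simp only [pvFirstP, hx', Bool.false_eq_true, if_false] at h
        cases hfp : pvFirstP pvIsEnd t with
        | none => rw [hfp] at h; exact absurd h (by simp)
        | some q =>
          obtain ⟨k', line'⟩ := q
          rw [hfp] at h
          simp only [Option.map_some, Option.some.injEq, Prod.mk.injEq] at h
          obtain ⟨hk, hl⟩ := h
          subst hk
          rw [hstep, ih.2 k' line' hfp]
          simp

-- A's accumulator formatting IS the flattened map
theorem pvFmtA_eq (d : List (List Char)) (acc : List Char) :
    pvFmtA d acc = acc ++ (d.map pvPiece).flatten := by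
  induction d generalizing acc with
  | nil => simp [pvFmtA]
  | cons l t ih => simp [pvFmtA, ih, pvPiece]

-- ===== VERDICT =====
theorem extract_file_description_spec : Claim_equal_extract_file_description := by
  intro contents _
  unfold Spec_extract_file_description extract_file_description extract_file_description_alt
  rw [pvLoopA_false]
  have hhead := head_filter_enum pvIsStart contents 0
  cases hhits : (PySem.List.enumerate contents 0).filter (fun p => pvIsStart p.2) with
  | nil =>
    rw [hhits] at hhead
    have hnone : pvFirstP pvIsStart contents = none := by
      cases h : pvFirstP pvIsStart contents with
      | none => rfl
      | some q => rw [h] at hhead; simp at hhead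
    rw [(firstP_findBody contents).1 hnone]
    simp [pvCollect]
  | cons hd tl =>
    obtain ⟨i, line⟩ := hd
    dsimp only
    rw [hhits] at hhead
    cases hfp : pvFirstP pvIsStart contents with
    | none => rw [hfp] at hhead; simp at hhead
    | some q =>
      obtain ⟨k, line'⟩ := q
      rw [hfp] at hhead
      simp at hhead
      obtain ⟨hi, hline⟩ := hhead
      subst hline
      have hbridge := (firstP_findBody contents).2 k line hfp
      by_cases hu : PySem.Chars.isIn "using".toList line.toList = true
      · rw [hbridge.1 hu, if_pos hu]
        simp
      · have hu' : PySem.Chars.isIn "using".toList line.toList = false := by simpa using hu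
        rw [hbridge.2 hu']
        simp only [hu]
        -- body0 = contents.drop (k+1)
        have hslice : PySem.List.slice contents (some (i + 1)) none = contents.drop (k + 1) := by
          rw [hi]
          have h1 : ((k : Int) + 1) = ((k + 1 : Nat) : Int) := by push_cast; ring
          rw [h1, PySem.List.slice_from_natCast]
        rw [hslice]
        set body0 := contents.drop (k + 1) with hbody0
        have hhead2 := head_filter_enum pvIsEnd body0 0
        cases hends : (PySem.List.enumerate body0 0).filter (fun p => pvIsEnd p.2) with
        | nil =>
          rw [hends] at hhead2
          have hnone2 : pvFirstP pvIsEnd body0 = none := by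
            cases h : pvFirstP pvIsEnd body0 with
            | none => rfl
            | some q => rw [h] at hhead2; simp at hhead2
          rw [(firstP_collect body0).1 hnone2]
          by_cases hb : body0 = []
          · simp [hb]
          · have hne : body0.map pvStripRep ≠ [] := by simpa using hb
            have hlen : (body0.map pvStripRep).length > 0 := List.length_pos_iff.mpr hne
            simp [hne, pvFmtA_eq, hb]
        | cons e etl =>
          obtain ⟨j, eline⟩ := e
          rw [hends] at hhead2
          cases hfp2 : pvFirstP pvIsEnd body0 with
          | none => rw [hfp2] at hhead2; simp at hhead2
          | some q2 =>
            obtain ⟨m, mline⟩ := q2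
            rw [hfp2] at hhead2
            simp at hhead2
            obtain ⟨hj, hmline⟩ := hhead2
            rw [(firstP_collect body0).2 m mline hfp2]
            have hslice2 : PySem.List.slice body0 none (some j) = body0.take m := by
              rw [hj, PySem.List.slice_to_natCast]
            simp only [hslice2]
            by_cases hb : body0.take m = []
            · simp [hb]
            · have hne : (body0.take m).map pvStripRep ≠ [] := by simpa using hb
              have hlen : ((body0.take m).map pvStripRep).length > 0 := List.length_pos_iff.mpr hne
              obtain ⟨hm0, hb0⟩ : ¬m = 0 ∧ ¬body0 = [] := by simpa using hb
              have hml : 0 < m := Nat.pos_of_ne_zero hm0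
              have hbl : 0 < body0.length := List.length_pos_iff.mpr hb0
              simp [pvFmtA_eq, hml, hbl, hm0, hb0]
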